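-- pv_equiv track=rewrite | github.com/AtoBrightSide/contests | pastContests/B_Minimum_Notation.py | solution
-- ===== SOURCE A (Python) =====
-- def solution(nums):
--     stack = [nums[0]]
--     popped = []
--     for i in range(1, len(nums)):
--         while stack and stack[-1] > nums[i]:
--             curr = stack.pop()
--             if curr == "9":
--                 popped.append("9")
--             else:
--                 popped.append(str(int(curr) + 1))
--
--         stack.append(nums[i])
--
--     popped.sort()
--     ans = []
--     i = j = 0
--     while i < len(stack) and j < len(popped):
--         if stack[i] <= popped[j]:
--             ans.append(stack[i])
--             i += 1
--         else:
--             ans.append(popped[j])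
--             j += 1
--
--     if i < len(stack):
--         ans.extend(stack[i:])
--     if j < len(popped):
--         ans.extend(popped[j:])
--
--     return "".join(ans)
-- ===== SOURCE B (Python) =====
-- def solution(nums):
--     # One right-to-left pass with a running suffix minimum classifies each char as
--     # kept or popped (a char is popped iff some later char is smaller); popped
--     # digits are incremented and counted into buckets 1-9 (counting sort), then
--     # merged into the kept sequence bucket by bucket.
--     counts = [0] * 10
--     kept_rev = []
--     mn = None
--     for c in reversed(nums):
--         if mn is not None and mn < c:
--             counts[9 if c == "9" else int(c) + 1] += 1
--         else:
--             kept_rev.append(c)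
--         if mn is None or c < mn:
--             mn = c
--     kept = kept_rev[::-1]
--     out = []
--     i = 0
--     for d in range(1, 10):
--         if counts[d]:
--             p = chr(48 + d)
--             while i < len(kept) and kept[i] <= p:
--                 out.append(kept[i])
--                 i += 1
--             out.append(p * counts[d])
--     out.append("".join(kept[i:]))
--     return "".join(out)
-- ===== Notes on version B (the rewrite author's own statement) =====
-- stated objective: alternative
-- what changed: Replaces A's monotonic stack, comparison sort of the popped digits and two-pointer merge by a single right-to-left suffix-minimum pass that classifies each character as kept or popped, counting buckets for the incremented popped digits 1-9 (counting sort), and a bucket-by-bucket merge into the kept sequence.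
import Mathlib
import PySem

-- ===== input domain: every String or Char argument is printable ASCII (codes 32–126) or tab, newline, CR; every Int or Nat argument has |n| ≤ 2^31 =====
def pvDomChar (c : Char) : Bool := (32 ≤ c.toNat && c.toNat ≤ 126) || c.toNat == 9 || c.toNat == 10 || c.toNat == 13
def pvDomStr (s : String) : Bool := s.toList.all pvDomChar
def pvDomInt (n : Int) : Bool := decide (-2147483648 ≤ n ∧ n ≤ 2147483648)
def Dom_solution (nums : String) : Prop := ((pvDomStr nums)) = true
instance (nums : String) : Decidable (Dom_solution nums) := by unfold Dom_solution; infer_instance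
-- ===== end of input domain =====

-- B replaces A's monotonic stack + comparison sort + two-pointer merge by a single right-to-left
-- suffix-minimum pass with counting buckets for the popped digits 1-9 (alternative algorithm).

-- ===== PORT A =====

-- `str(int(curr) + 1)` / the `"9"` branch; on a non-digit `curr` Python's `int` raises
-- ValueError — those inputs are excluded by Pre_solution, '?' is a junk value never claimed.
def pvIncA (c : Char) : Char :=
  if c = '9' then '9'
  else if '0' ≤ c ∧ c ≤ '8' then Char.ofNat (c.toNat + 1) else '?'

-- the inner `while stack and stack[-1] > nums[i]` loop; the stack is kept top-first.
def pvPopA : List Char → List Char → Char → List Char × List Char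
  | [], popped, _ => ([], popped)
  | t :: rest, popped, c =>
    if c < t then pvPopA rest (popped ++ [pvIncA t]) c else (t :: rest, popped)

-- the two-pointer merge loop plus the two trailing `extend`s.
def pvMergeA : List Char → List Char → List Char
  | [], p => p
  | a :: s, [] => a :: s
  | a :: s, b :: p => if a ≤ b then a :: pvMergeA s (b :: p) else b :: pvMergeA (a :: s) p
termination_by s p => s.length + p.length

def solution (nums : String) : String :=
  match nums.toList with
  | [] => ""   -- `nums[0]` raises IndexError here; excluded by Pre_solution
  | c :: rest =>
    let st := rest.foldl (fun (s : List Char × List Char) x =>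
      let t := pvPopA s.1 s.2 x
      (x :: t.1, t.2)) ([c], [])
    -- `popped.sort()` then the merge; `"".join` of one-char strings is `String.ofList`
    String.ofList (pvMergeA st.1.reverse (PySem.List.sorted st.2 (fun x => x) false))

-- ===== PORT B =====

-- `mn = c if (mn is None or c < mn) else mn`
def pvMinUpd (mn : Option Char) (c : Char) : Option Char :=
  match mn with
  | none => some c
  | some m => if c < m then some c else some m

-- `mn is not None and mn < c`
def pvLtO (mn : Option Char) (c : Char) : Bool :=
  match mn with
  | none => false
  | some m => decide (m < c)

-- `9 if c == "9" else int(c) + 1`; on a non-digit `c` Python's `int` raises ValueError —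
-- excluded by Pre_solution, 0 is a junk bucket never emitted.
def pvBucket (c : Char) : Nat :=
  if c = '9' then 9 else if '0' ≤ c ∧ c ≤ '8' then c.toNat - 47 else 0

-- the loop body of B's right-to-left pass
def pvStepB (s : (List Nat × List Char) × Option Char) (c : Char) : (List Nat × List Char) × Option Char :=
  let cc :=
    if pvLtO s.2 c then
      (s.1.1.set (pvBucket c) (s.1.1.getD (pvBucket c) 0 + 1), s.1.2)
    else (s.1.1, s.1.2 ++ [c])
  (cc, pvMinUpd s.2 c)

-- `while i < len(kept) and kept[i] <= p`
def pvTakeLE : List Char → Char → List Char × List Char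
  | [], _ => ([], [])
  | a :: r, p =>
    if a ≤ p then
      let t := pvTakeLE r p
      (a :: t.1, t.2)
    else ([], a :: r)

def solution_alt (nums : String) : String :=
  let st := nums.toList.reverse.foldl pvStepB ((List.replicate 10 0, []), none)
  let counts := st.1.1
  let kept := st.1.2.reverse
  let fin := (PySem.List.pyRange 1 10 1).foldl (fun (s : List Char × List Char) d =>
      if counts.getD d.toNat 0 > 0 then
        let p := Char.ofNat (48 + d.toNat)
        let t := pvTakeLE s.2 p
        (s.1 ++ t.1 ++ List.replicate (counts.getD d.toNat 0) p, t.2)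
      else s) ([], kept)
  String.ofList (fin.1 ++ fin.2)

-- ===== PRECONDITION & SPEC =====

-- Pre_ excludes exactly the inputs on which A raises: the empty string (IndexError on nums[0])
-- and strings where some character with a smaller character after it is not a digit
-- (ValueError in int(curr) when it gets popped).
def Pre_solution (nums : String) : Prop :=
  nums.toList ≠ [] ∧ ∀ i, i < nums.toList.length →
    ((nums.toList.drop (i + 1)).any (fun x => x < nums.toList.getD i ' ')) = true →
    ('0' ≤ nums.toList.getD i ' ' ∧ nums.toList.getD i ' ' ≤ '9')
instance (nums : String) : Decidable (Pre_solution nums) := by unfold Pre_solution; infer_instance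

def pvWitness_solution : String := "2931"

def Spec_solution (nums : String) (out : String) : Prop := out = solution_alt nums
instance (nums : String) (out : String) : Decidable (Spec_solution nums out) := by unfold Spec_solution; infer_instance

-- ===== CLAIM (what is proved, stated in full; the proofs are below) =====
def Claim_equal_solution : Prop := ∀ (nums : String), Dom_solution nums → Pre_solution nums → Spec_solution nums (solution nums)

-- ===== LEMMAS AND PROOFS =====

-- the characters never popped from A's stack (kept iff ≤ every later character), in order
def pvKeep : List Char → List Char
  | [] => []
  | c :: r => (if r.all (fun x => c ≤ x) then [c] else []) ++ pvKeep r

-- the characters that do get popped, in order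
def pvDrop : List Char → List Char
  | [] => []
  | c :: r => (if r.all (fun x => c ≤ x) then [] else [c]) ++ pvDrop r

theorem pvPopA_spec (stk popped : List Char) (c : Char) :
    pvPopA stk popped c
      = (stk.dropWhile (fun t => decide (c < t)),
         popped ++ (stk.takeWhile (fun t => decide (c < t))).map pvIncA) := by
  induction stk generalizing popped with
  | nil => simp [pvPopA]
  | cons t rest ih =>
    by_cases h : c < t
    · simp [pvPopA, h, List.dropWhile, List.takeWhile, ih]
    · simp [pvPopA, h, List.dropWhile, List.takeWhile]

theorem dropWhile_le (stk : List Char) (x : Char)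
    (h : stk.Pairwise (fun a b => b ≤ a)) :
    ∀ y ∈ stk.dropWhile (fun t => decide (x < t)), y ≤ x := by
  induction stk with
  | nil => simp
  | cons t rest ih =>
    intro y hy
    rw [List.dropWhile_cons] at hy
    rcases List.pairwise_cons.mp h with ⟨ht, hrest⟩
    by_cases hxt : x < t
    · simp [hxt] at hy; exact ih hrest y hy
    · simp [hxt] at hy
      rcases hy with rfl | hy
      · exact le_of_not_gt hxt
      · exact le_trans (ht y hy) (le_of_not_gt hxt)

-- characters strictly greater than some later character are the popped ones
theorem any_lt_eq_not_all (r : List Char) (a : Char) :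
    decide (∃ x ∈ r, x < a) = !r.all fun y => decide (a ≤ y) := by
  by_cases hall : (r.all fun y => decide (a ≤ y)) = true
  · have hne : ¬ ∃ x ∈ r, x < a := by
      simp only [List.all_eq_true, decide_eq_true_eq] at hall
      rintro ⟨y, hy, hlt⟩
      exact absurd hlt (not_lt.mpr (hall y hy))
    simp [hall, hne]
  · have hex : ∃ x ∈ r, x < a := by
      simpa [List.all_eq_true, not_le] using hall
    simp [Bool.eq_false_iff.mpr hall, hex]

theorem A_inv (l : List Char) (stk popped : List Char)
    (h : stk.Pairwise (fun a b => b ≤ a)) :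
    (l.foldl (fun (s : List Char × List Char) x =>
        let t := pvPopA s.1 s.2 x
        (x :: t.1, t.2)) (stk, popped)).1.reverse
      = (stk.filter (fun c => l.all (fun x => c ≤ x))).reverse ++ pvKeep l
  ∧ ((l.foldl (fun (s : List Char × List Char) x =>
        let t := pvPopA s.1 s.2 x
        (x :: t.1, t.2)) (stk, popped)).2 : Multiset Char)
      = (popped : Multiset Char)
        + ((stk.filter (fun c => ¬ l.all (fun x => c ≤ x))).map pvIncA : Multiset Char)
        + ((pvDrop l).map pvIncA : Multiset Char) := by
  induction l generalizing stk popped with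
  | nil => simp [pvKeep, pvDrop]
  | cons x r ih =>
    set d := stk.dropWhile (fun t => decide (x < t)) with hdd
    set tw := stk.takeWhile (fun t => decide (x < t)) with htw
    have hd : d.Pairwise (fun a b => b ≤ a) := List.Pairwise.sublist (List.dropWhile_sublist _) h
    have hxle : ∀ y ∈ d, y ≤ x := dropWhile_le stk x h
    have h' : (x :: d).Pairwise (fun a b => b ≤ a) :=
      List.pairwise_cons.mpr ⟨hxle, hd⟩
    have hsplit : stk.filter (fun c => (x :: r).all (fun y => c ≤ y))
        = d.filter (fun c => r.all (fun y => c ≤ y)) := by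
      conv_lhs => rw [← List.takeWhile_append_dropWhile (p := fun t => decide (x < t)) (l := stk)]
      rw [List.filter_append]
      have h1 : tw.filter (fun c => (x :: r).all (fun y => c ≤ y)) = [] := by
        rw [List.filter_eq_nil_iff]
        intro a ha
        have := List.mem_takeWhile_imp ha
        simp at this ⊢
        intro hax
        exact absurd hax (not_le.mpr this)
      have h2 : d.filter (fun c => (x :: r).all (fun y => c ≤ y))
          = d.filter (fun c => r.all (fun y => c ≤ y)) := by
        apply List.filter_congr
        intro a ha
        simp [hxle a ha]
      rw [h1, h2]; rfl
    have hsplit2 : stk.filter (fun c => !(x :: r).all (fun y => c ≤ y))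
        = tw ++ d.filter (fun c => !r.all (fun y => c ≤ y)) := by
      conv_lhs => rw [← List.takeWhile_append_dropWhile (p := fun t => decide (x < t)) (l := stk)]
      rw [List.filter_append]
      have h1 : tw.filter (fun c => !(x :: r).all (fun y => c ≤ y)) = tw := by
        rw [List.filter_eq_self]
        intro a ha
        have := List.mem_takeWhile_imp ha
        simp at this ⊢
        exact Or.inl this
      have h2 : d.filter (fun c => !(x :: r).all (fun y => c ≤ y))
          = d.filter (fun c => !r.all (fun y => c ≤ y)) := by
        apply List.filter_congr
        intro a ha
        simp [hxle a ha]
      rw [h1, h2]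
    have hp : pvPopA stk popped x = (d, popped ++ tw.map pvIncA) := by
      rw [pvPopA_spec]
    rw [List.foldl_cons]
    dsimp only
    simp only [hp]
    obtain ⟨ih1, ih2⟩ := ih (x :: d) (popped ++ tw.map pvIncA) h'
    constructor
    · rw [ih1, hsplit]
      by_cases hx : r.all (fun y => x ≤ y) <;>
        simp [pvKeep, hx]
    · rw [ih2]
      rw [show (pvDrop (x :: r) : List Char)
            = (if r.all (fun y => x ≤ y) then [] else [x]) ++ pvDrop r from rfl]
      have : stk.filter (fun c => decide ¬((x :: r).all (fun y => c ≤ y) = true))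
          = tw ++ d.filter (fun c => !r.all (fun y => c ≤ y)) := by
        rw [← hsplit2]; apply List.filter_congr; intro a _
        simp
        rw [any_lt_eq_not_all]
      rw [this]
      have hfc : List.filter (fun c => decide (∃ x ∈ r, x < c)) d
          = List.filter (fun c => !r.all fun y => decide (c ≤ y)) d :=
        List.filter_congr (fun a _ => any_lt_eq_not_all r a)
      by_cases hx : r.all (fun y => x ≤ y)
      · have hne : ¬ ∃ y ∈ r, y < x := by
          simp only [List.all_eq_true, decide_eq_true_eq] at hx
          rintro ⟨y, hy, hlt⟩
          exact absurd hlt (not_lt.mpr (hx y hy))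
        simp [hx, hne, hfc]
      · have hex : ∃ y ∈ r, y < x := by
          simpa [List.all_eq_true, not_le] using hx
        simp [hx, hex, hfc]
        apply List.Perm.append_left
        apply List.Perm.append_left
        exact List.perm_middle.symm

-- ===== B side =====

-- B's kept characters, processed right-to-left with running minimum mn
def pvKeepR : Option Char → List Char → List Char
  | _, [] => []
  | mn, c :: t => (if pvLtO mn c then [] else [c]) ++ pvKeepR (pvMinUpd mn c) t

def pvDropR : Option Char → List Char → List Char
  | _, [] => []
  | mn, c :: t => (if pvLtO mn c then [c] else []) ++ pvDropR (pvMinUpd mn c) t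

def pvMinO : Option Char → List Char → Option Char
  | mn, [] => mn
  | mn, c :: t => pvMinO (pvMinUpd mn c) t

def pvAddCounts (counts : List Nat) (ds : List Char) : List Nat :=
  ds.foldl (fun cs c => cs.set (pvBucket c) (cs.getD (pvBucket c) 0 + 1)) counts

theorem B_inv (m : List Char) (counts : List Nat) (keptRev : List Char) (mn : Option Char) :
    m.foldl pvStepB ((counts, keptRev), mn)
      = ((pvAddCounts counts (pvDropR mn m), keptRev ++ pvKeepR mn m), pvMinO mn m) := by
  induction m generalizing counts keptRev mn with
  | nil => simp [pvAddCounts, pvDropR, pvKeepR, pvMinO]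
  | cons c t ih =>
    by_cases h : pvLtO mn c = true
    · simp [List.foldl_cons, pvStepB, h, ih, pvAddCounts, pvDropR, pvKeepR, pvMinO]
    · simp [List.foldl_cons, pvStepB, h, ih, pvAddCounts, pvDropR, pvKeepR, pvMinO]

theorem ltO_minO (m : List Char) (mn : Option Char) (x : Char) :
    pvLtO (pvMinO mn m) x = (pvLtO mn x || m.any (fun y => decide (y < x))) := by
  induction m generalizing mn with
  | nil => simp [pvMinO]
  | cons c t ih =>
    have hupd : pvLtO (pvMinUpd mn c) x = (pvLtO mn x || decide (c < x)) := by
      cases mn with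
      | none => simp [pvMinUpd, pvLtO]
      | some m =>
        by_cases h : c < m <;> simp [pvMinUpd, pvLtO, h]
        · intro hm; exact lt_trans h hm
        · intro hc; exact lt_of_le_of_lt (le_of_not_gt h) hc
    simp [pvMinO, ih, hupd, Bool.or_assoc]

theorem keepR_append (m : List Char) (mn : Option Char) (x : Char) :
    pvKeepR mn (m ++ [x]) = pvKeepR mn m ++ (if pvLtO (pvMinO mn m) x then [] else [x]) := by
  induction m generalizing mn with
  | nil => simp [pvKeepR, pvMinO]
  | cons c t ih => simp [pvKeepR, pvMinO, ih]

theorem dropR_append (m : List Char) (mn : Option Char) (x : Char) :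
    pvDropR mn (m ++ [x]) = pvDropR mn m ++ (if pvLtO (pvMinO mn m) x then [x] else []) := by
  induction m generalizing mn with
  | nil => simp [pvDropR, pvMinO]
  | cons c t ih => simp [pvDropR, pvMinO, ih]

theorem ltO_rev_eq (r : List Char) (x : Char) :
    pvLtO (pvMinO none r.reverse) x = !(r.all fun y => decide (x ≤ y)) := by
  rw [ltO_minO]
  simp only [pvLtO, Bool.false_or, List.any_reverse]
  rw [show (r.any fun y => decide (y < x)) = decide (∃ y ∈ r, y < x) from by
    simp [List.any_eq]]
  exact any_lt_eq_not_all r x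

theorem keepR_eq (l : List Char) : pvKeepR none l.reverse = (pvKeep l).reverse := by
  induction l with
  | nil => simp [pvKeepR, pvKeep]
  | cons x r ih =>
    simp only [List.reverse_cons, keepR_append, ih, pvKeep]
    by_cases hx : r.all (fun y => decide (x ≤ y)) <;>
      simp [ltO_rev_eq, hx]

theorem dropR_eq (l : List Char) : pvDropR none l.reverse = (pvDrop l).reverse := by
  induction l with
  | nil => simp [pvDropR, pvDrop]
  | cons x r ih =>
    simp only [List.reverse_cons, dropR_append, ih, pvDrop]
    by_cases hx : r.all (fun y => decide (x ≤ y)) <;>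
      simp [ltO_rev_eq, hx]

-- ===== counting sort =====

def pvFlat (counts : List Nat) : List Char :=
  ([1,2,3,4,5,6,7,8,9] : List Nat).flatMap
    (fun d => List.replicate (counts.getD d 0) (Char.ofNat (48 + d)))

theorem char_le_iff (a b : Char) : a ≤ b ↔ a.toNat ≤ b.toNat := by
  rw [Char.le_def, UInt32.le_iff_toNat_le]; rfl

theorem char_toNat_inj {a b : Char} (h : a.toNat = b.toNat) : a = b :=
  Char.ext (UInt32.toNat_inj.mp h)

theorem bucket_range (c : Char) (hc : '0' ≤ c ∧ c ≤ '9') :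
    1 ≤ pvBucket c ∧ pvBucket c ≤ 9 := by
  obtain ⟨h0, h9⟩ := hc
  rw [char_le_iff] at h0 h9
  have e0 : '0'.toNat = 48 := rfl
  have e9 : '9'.toNat = 57 := rfl
  unfold pvBucket
  split_ifs with h1 h2
  · omega
  · have h8 : c.toNat ≤ 56 := (char_le_iff c '8').mp h2.2
    omega
  · exfalso
    apply h2
    refine ⟨(char_le_iff '0' c).mpr (by omega), (char_le_iff c '8').mpr ?_⟩
    have e8 : '8'.toNat = 56 := rfl
    have hne : c.toNat ≠ 57 := fun he => h1 (char_toNat_inj (by omega))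
    omega

theorem inc_eq (c : Char) (hc : '0' ≤ c ∧ c ≤ '9') :
    pvIncA c = Char.ofNat (48 + pvBucket c) := by
  by_cases h9 : c = '9'
  · subst h9; decide
  · obtain ⟨h0, h9'⟩ := hc
    rw [char_le_iff] at h0 h9'
    have e0 : '0'.toNat = 48 := rfl
    have e9 : '9'.toNat = 57 := rfl
    have hne : c.toNat ≠ 57 := fun he => h9 (char_toNat_inj (by omega))
    have h8 : '0' ≤ c ∧ c ≤ '8' := by
      refine ⟨(char_le_iff '0' c).mpr (by omega), (char_le_iff c '8').mpr ?_⟩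
      have e8 : '8'.toNat = 56 := rfl
      omega
    rw [pvIncA, pvBucket, if_neg h9, if_pos h8, if_neg h9, if_pos h8]
    congr 1
    omega

theorem getD_set_eq (cs : List Nat) (k v : Nat) (hk : k < cs.length) :
    (cs.set k v).getD k 0 = v := by
  simp [List.getD_eq_getElem?_getD, List.getElem?_set_self hk]

theorem getD_set_ne (cs : List Nat) {k j : Nat} (v : Nat) (h : k ≠ j) :
    (cs.set k v).getD j 0 = cs.getD j 0 := by
  simp [List.getD_eq_getElem?_getD, List.getElem?_set_ne h]

theorem flat_insert (counts : List Nat) (hlen : counts.length = 10) (c : Char)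
    (hc : '0' ≤ c ∧ c ≤ '9') :
    (pvFlat (counts.set (pvBucket c) (counts.getD (pvBucket c) 0 + 1)) : Multiset Char)
      = (pvIncA c ::ₘ (pvFlat counts : Multiset Char)) := by
  have hb := bucket_range c hc
  have hi := inc_eq c hc
  have hk : pvBucket c < counts.length := by omega
  have hcase : pvBucket c = 1 ∨ pvBucket c = 2 ∨ pvBucket c = 3 ∨ pvBucket c = 4 ∨
      pvBucket c = 5 ∨ pvBucket c = 6 ∨ pvBucket c = 7 ∨ pvBucket c = 8 ∨ pvBucket c = 9 := by
    omega
  rcases hcase with hb1 | hb1 | hb1 | hb1 | hb1 | hb1 | hb1 | hb1 | hb1 <;>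
    · rw [hb1] at hk hi ⊢
      simp only [pvFlat, List.flatMap_cons, List.flatMap_nil, List.append_nil]
      rw [getD_set_eq counts _ _ hk]
      repeat rw [getD_set_ne counts _ (by omega)]
      rw [List.replicate_succ, hi]
      rw [Multiset.cons_coe, Multiset.coe_eq_coe]
      try simp only [List.cons_append]
      repeat' first
        | exact List.Perm.refl _
        | exact List.perm_middle
        | refine List.Perm.trans (List.Perm.append_left _ ?_) List.perm_middle

theorem addCounts_flat (ds : List Char) (counts : List Nat) (hlen : counts.length = 10)
    (hd : ∀ c ∈ ds, '0' ≤ c ∧ c ≤ '9') :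
    (pvFlat (pvAddCounts counts ds) : Multiset Char)
      = ((ds.map pvIncA : List Char) : Multiset Char) + (pvFlat counts : Multiset Char) := by
  induction ds generalizing counts with
  | nil => simp [pvAddCounts]
  | cons c t ih =>
    have hc := hd c (List.mem_cons_self)
    have hstep : pvAddCounts counts (c :: t)
        = pvAddCounts (counts.set (pvBucket c) (counts.getD (pvBucket c) 0 + 1)) t := rfl
    rw [hstep, ih _ (by simpa using hlen) (fun x hx => hd x (List.mem_cons_of_mem _ hx)),
        flat_insert counts hlen c hc]
    simp

theorem toNat_ofNat_small (n : Nat) (h : n < 100) : (Char.ofNat n).toNat = n := by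
  have hv : n.isValidChar := Or.inl (by omega)
  simp [Char.toNat_ofNat, hv]

theorem flat_pairwise_aux (counts : List Nat) (ds : List Nat)
    (hb : ∀ d ∈ ds, d ≤ 9) (h : ds.Pairwise (fun a b => a ≤ b)) :
    (ds.flatMap (fun d => List.replicate (counts.getD d 0) (Char.ofNat (48 + d)))).Pairwise
      (fun a b => a ≤ b) := by
  induction ds with
  | nil => simp
  | cons d t ih =>
    rw [List.flatMap_cons, List.pairwise_append]
    rcases List.pairwise_cons.mp h with ⟨hd1, hd2⟩
    refine ⟨List.pairwise_replicate.mpr (Or.inr le_rfl),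
      ih (fun x hx => hb x (List.mem_cons_of_mem _ hx)) hd2, ?_⟩
    intro a ha b hbm
    rw [List.eq_of_mem_replicate ha]
    obtain ⟨d', hd', hb'⟩ := List.mem_flatMap.mp hbm
    rw [List.eq_of_mem_replicate hb']
    rw [char_le_iff, toNat_ofNat_small _ (by have := hb d List.mem_cons_self; omega),
        toNat_ofNat_small _ (by have := hb d' (List.mem_cons_of_mem _ hd'); omega)]
    have := hd1 d' hd'
    omega

theorem flat_pairwise (counts : List Nat) : (pvFlat counts).Pairwise (fun a b => a ≤ b) := by
  exact flat_pairwise_aux counts [1,2,3,4,5,6,7,8,9] (by decide) (by decide)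

-- ===== merge =====

theorem mergeA_skip (a p : Char) (k rest : List Char) (h : ¬ a ≤ p) (n : Nat) :
    pvMergeA (a :: k) (List.replicate n p ++ rest)
      = List.replicate n p ++ pvMergeA (a :: k) rest := by
  induction n with
  | zero => simp
  | succ m ih => simp [List.replicate_succ, pvMergeA, h, ih]

theorem mergeA_rep (kept : List Char) (p : Char) (n : Nat) (rest : List Char) (hn : 0 < n) :
    pvMergeA kept (List.replicate n p ++ rest)
      = (pvTakeLE kept p).1 ++ List.replicate n p ++ pvMergeA (pvTakeLE kept p).2 rest := by
  induction kept with
  | nil =>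
    obtain ⟨m, rfl⟩ : ∃ m, n = m + 1 := ⟨n - 1, (Nat.succ_pred_eq_of_pos hn).symm⟩
    simp [pvTakeLE, List.replicate_succ, pvMergeA]
  | cons a k ih =>
    by_cases hap : a ≤ p
    · obtain ⟨m, rfl⟩ : ∃ m, n = m + 1 := ⟨n - 1, (Nat.succ_pred_eq_of_pos hn).symm⟩
      simp only [List.replicate_succ, List.cons_append, pvMergeA, hap, if_pos]
      rw [show (p :: (List.replicate m p ++ rest)) = List.replicate (m+1) p ++ rest from by
        simp [List.replicate_succ]]
      rw [ih]
      simp [pvTakeLE, hap, List.replicate_succ]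
    · rw [mergeA_skip a p k rest hap n]
      simp [pvTakeLE, hap]

theorem foldB (counts : List Nat) (ds : List Int) (out kept : List Char) :
    (ds.foldl (fun (s : List Char × List Char) d =>
      if counts.getD d.toNat 0 > 0 then
        let p := Char.ofNat (48 + d.toNat)
        let t := pvTakeLE s.2 p
        (s.1 ++ t.1 ++ List.replicate (counts.getD d.toNat 0) p, t.2)
      else s) (out, kept)).1
    ++ (ds.foldl (fun (s : List Char × List Char) d =>
      if counts.getD d.toNat 0 > 0 then
        let p := Char.ofNat (48 + d.toNat)
        let t := pvTakeLE s.2 p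
        (s.1 ++ t.1 ++ List.replicate (counts.getD d.toNat 0) p, t.2)
      else s) (out, kept)).2
      = out ++ pvMergeA kept (ds.flatMap
          (fun d => List.replicate (counts.getD d.toNat 0) (Char.ofNat (48 + d.toNat)))) := by
  induction ds generalizing out kept with
  | nil =>
    cases kept <;> simp [pvMergeA]
  | cons d t ih =>
    by_cases hc : counts.getD d.toNat 0 > 0
    · simp only [List.foldl_cons, List.flatMap_cons, hc, if_pos]
      rw [ih]
      rw [mergeA_rep kept (Char.ofNat (48 + d.toNat)) _ _ hc]
      simp
    · have hc0 : counts.getD d.toNat 0 = 0 := by omega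
      simp only [List.foldl_cons, List.flatMap_cons]
      rw [hc0]
      rw [if_neg (by omega : ¬ (0:Nat) > 0)]
      rw [List.replicate_zero, List.nil_append]
      exact ih out kept

-- ===== assembly =====

theorem pre_digits (l : List Char)
    (hp : ∀ i, i < l.length → ((l.drop (i + 1)).any (fun x => x < l.getD i ' ')) = true →
      ('0' ≤ l.getD i ' ' ∧ l.getD i ' ' ≤ '9')) :
    ∀ c ∈ pvDrop l, '0' ≤ c ∧ c ≤ '9' := by
  induction l with
  | nil => simp [pvDrop]
  | cons x r ih =>
    intro c hc
    rw [show pvDrop (x :: r)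
        = (if r.all (fun y => x ≤ y) then [] else [x]) ++ pvDrop r from rfl] at hc
    rcases List.mem_append.mp hc with h1 | h1
    · by_cases hx : (r.all fun y => decide (x ≤ y)) = true
      · simp [hx] at h1
      · simp only [hx, Bool.false_eq_true, if_false, List.mem_singleton] at h1
        subst h1
        have hex : ∃ y ∈ r, y < c := by
          simpa [List.all_eq_true, not_le] using hx
        exact hp 0 (by simp) (by simpa [List.any_eq_true] using hex)
    · exact ih (fun i hi he => hp (i + 1) (by simp; omega) he) c h1

theorem flat_bridge (counts : List Nat) :
    (PySem.List.pyRange 1 10 1).flatMap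
        (fun d => List.replicate (counts.getD d.toNat 0) (Char.ofNat (48 + d.toNat)))
      = pvFlat counts := by
  rw [show PySem.List.pyRange 1 10 1 = ([1,2,3,4,5,6,7,8,9] : List Int) from by decide]
  rfl

theorem main_eq (l : List Char) (hne : l ≠ [])
    (hp : ∀ i, i < l.length → ((l.drop (i + 1)).any (fun x => x < l.getD i ' ')) = true →
      ('0' ≤ l.getD i ' ' ∧ l.getD i ' ' ≤ '9')) :
    ∀ nums : String, nums.toList = l → solution nums = solution_alt nums := by
  intro nums hl
  obtain ⟨c, rest, rfl⟩ : ∃ c rest, l = c :: rest := by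
    cases l with
    | nil => exact absurd rfl hne
    | cons c rest => exact ⟨c, rest, rfl⟩
  have hdig : ∀ x ∈ pvDrop (c :: rest), '0' ≤ x ∧ x ≤ '9' := pre_digits _ hp
  -- A side
  obtain ⟨ih1, ih2⟩ := A_inv rest [c] [] (List.pairwise_singleton _ _)
  set stA := rest.foldl (fun (s : List Char × List Char) x =>
      let t := pvPopA s.1 s.2 x
      (x :: t.1, t.2)) ([c], []) with hstA
  have hstack : stA.1.reverse = pvKeep (c :: rest) := by
    rw [ih1]
    by_cases hx : (rest.all fun y => decide (c ≤ y)) = true <;>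
      simp [pvKeep, hx, List.filter]
  have hpopM : (stA.2 : Multiset Char) = ((pvDrop (c :: rest)).map pvIncA : Multiset Char) := by
    rw [ih2]
    rw [show pvDrop (c :: rest)
        = (if rest.all (fun y => c ≤ y) then [] else [c]) ++ pvDrop rest from rfl]
    by_cases hx : (rest.all fun y => decide (c ≤ y)) = true <;>
      simp [hx, List.filter]
  -- B side
  have hB := B_inv (c :: rest).reverse (List.replicate 10 0) [] none
  set counts := pvAddCounts (List.replicate 10 0) (pvDropR none (c :: rest).reverse) with hcounts
  have hkept : pvKeepR none (c :: rest).reverse = (pvKeep (c :: rest)).reverse := keepR_eq _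
  have hdropb : pvDropR none (c :: rest).reverse = (pvDrop (c :: rest)).reverse := dropR_eq _
  -- sorted popped = pvFlat counts
  have hlen : (List.replicate 10 (0:Nat)).length = 10 := by simp
  have hflatM : (pvFlat counts : Multiset Char)
      = (((pvDrop (c :: rest)).reverse.map pvIncA : List Char) : Multiset Char) := by
    rw [hcounts, hdropb, addCounts_flat _ _ hlen
      (fun x hx => hdig x (List.mem_reverse.mp hx))]
    rw [show pvFlat (List.replicate 10 0) = [] from by decide]
    simp
  have hperm : (pvFlat counts).Perm stA.2 := by
    rw [← Multiset.coe_eq_coe]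
    rw [hflatM, hpopM, Multiset.coe_eq_coe]
    exact (List.reverse_perm _).map pvIncA
  have hsorted : PySem.List.sorted stA.2 (fun x => x) false = pvFlat counts :=
    PySem.List.sorted_id_eq_of_perm_of_pairwise _ _ hperm (flat_pairwise counts)
  -- assemble
  show solution nums = solution_alt nums
  unfold solution solution_alt
  rw [hl]
  dsimp only
  have hfold : List.foldl (fun (s : List Char × List Char) x =>
      (x :: (pvPopA s.1 s.2 x).1, (pvPopA s.1 s.2 x).2)) ([c], []) rest = stA := rfl
  rw [hfold, hstack, hsorted, hB]
  dsimp only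
  rw [foldB, flat_bridge, hkept]
  simp

-- ===== VERDICT (by name: the statement is the Claim_ definition above) =====
theorem solution_spec : Claim_equal_solution := by
  intro nums _ hpre
  unfold Spec_solution
  exact main_eq nums.toList hpre.1 hpre.2 nums rfl
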